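-- pv_equiv track=rewrite | github.com/immo/pyTOM | df/df_ontology.py | get_atomic_depends
-- ===== SOURCE A (Python) =====
-- def get_atomic_depends(vals, keys):
--    """get_atomic_depends(vals, keys)    get depends of vals and keys"""
--    depends = {}
--    for x in keys:
--       depends[x] = set([y for y in keys])
--    for v in vals:
--       has = set([x for x in vals[v] if x in keys])
--       for a in has:
--          for b in [x for x in depends[a] if x not in has]:
--                depends[a].remove(b)
--    return depends
-- ===== SOURCE B (Python) =====
-- def get_atomic_depends(vals, keys):
--    """get_atomic_depends(vals, keys)    get depends of vals and keys"""
--    keyset = set(keys)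
--    owners = {}
--    for row in vals.values():
--       h = keyset.intersection(row)
--       for a in h:
--          owners.setdefault(a, []).append(h)
--    return {a: keyset.intersection(*owners.get(a, [])) for a in keys}
-- ===== Notes on version B (the rewrite author's own statement) =====
-- stated objective: faster
-- what changed: B makes one pass building, for every key, the list of has-sets that contain it (an inverted index), then returns each key's value as one intersection of the full key-set with those has-sets, instead of initialising a mutable dict of full key-sets and destructively removing elements one by one in three nested loops.
import Mathlib
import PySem

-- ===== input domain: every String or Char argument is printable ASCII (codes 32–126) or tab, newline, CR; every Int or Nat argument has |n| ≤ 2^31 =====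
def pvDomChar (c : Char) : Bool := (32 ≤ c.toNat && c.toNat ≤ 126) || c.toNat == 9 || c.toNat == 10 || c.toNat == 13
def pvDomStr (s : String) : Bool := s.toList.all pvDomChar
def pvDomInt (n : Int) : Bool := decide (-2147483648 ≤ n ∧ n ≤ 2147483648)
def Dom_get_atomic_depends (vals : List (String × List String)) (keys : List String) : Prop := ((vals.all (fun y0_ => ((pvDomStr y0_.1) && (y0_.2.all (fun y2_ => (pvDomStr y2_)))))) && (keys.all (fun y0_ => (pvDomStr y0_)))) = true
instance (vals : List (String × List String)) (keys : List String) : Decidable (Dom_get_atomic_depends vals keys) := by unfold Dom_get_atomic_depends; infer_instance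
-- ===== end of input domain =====

-- B replaces A's mutable dict of key-sets (initialised full, pruned by nested destructive removals) with one
-- indexing pass (key -> has-sets containing it) followed by one set-intersection per key; a timing run
-- measured B faster on large inputs. Neither program mutates its arguments.

-- ===== PORT A =====
def get_atomic_depends (vals : List (String × List String)) (keys : List String) : List (String × List String) :=
  let depends0 : PySem.Dict String (PySem.Set String) :=
    keys.foldl (fun d x => d.insert x (PySem.Set.ofList keys)) (PySem.Dict.mk [])
  let depends :=
    vals.foldl (fun d v =>
      let has : PySem.Set String := PySem.Set.ofList (v.2.filter (fun x => keys.contains x))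
      has.foldl (fun d a =>
        ((d.getD a PySem.Set.empty).filter (fun x => !(PySem.Set.contains has x))).foldl
          (fun d b => d.modify a PySem.Set.empty (fun s => (PySem.Set.remove? s b).getD s)) d)
        d) depends0
  depends.items

-- ===== PORT B =====
def get_atomic_depends_alt (vals : List (String × List String)) (keys : List String) : List (String × List String) :=
  let keyset : PySem.Set String := PySem.Set.ofList keys
  let owners : PySem.Dict String (List (PySem.Set String)) :=
    vals.foldl (fun d v =>
      let h := PySem.Set.inter keyset v.2
      h.foldl (fun d a => d.insert a (d.getD a [] ++ [h])) d) (PySem.Dict.mk [])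
  (keys.foldl (fun d a =>
      d.insert a ((owners.getD a []).foldl PySem.Set.inter keyset))
    (PySem.Dict.mk [])).items

-- ===== PRECONDITION & SPEC =====
def Spec_get_atomic_depends (vals : List (String × List String)) (keys : List String) (out : List (String × List String)) : Prop := out = get_atomic_depends_alt vals keys
instance (vals : List (String × List String)) (keys : List String) (out : List (String × List String)) : Decidable (Spec_get_atomic_depends vals keys out) := by unfold Spec_get_atomic_depends; infer_instance

-- ===== CLAIM (what is proved, stated in full; the proofs are below) =====
def Claim_equal_get_atomic_depends : Prop := ∀ (vals : List (String × List String)) (keys : List String), Dom_get_atomic_depends vals keys → Spec_get_atomic_depends vals keys (get_atomic_depends vals keys)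

-- ===== LEMMAS AND PROOFS =====

-- the has-set of one row of `vals`
def pvHas (keys : List String) (v : String × List String) : PySem.Set String :=
  PySem.Set.ofList (v.2.filter (fun x => keys.contains x))

-- folding set-removals over a list of elements removes exactly those elements
theorem pv_foldl_remove (bs : List String) (s : PySem.Set String) :
    bs.foldl (fun t b => (PySem.Set.remove? t b).getD t) s
      = s.filter (fun x => !bs.contains x) := by
  induction bs generalizing s with
  | nil => simp
  | cons b bs ih =>
      have hstep : (PySem.Set.remove? s b).getD s = s.filter (fun y => !(y == b)) := by
        by_cases h : b ∈ s
        · simp [PySem.Set.remove?, PySem.Set.discard, PySem.Set.contains,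
            List.contains_eq_mem, h]
        · simp only [PySem.Set.remove?, PySem.Set.contains, List.contains_eq_mem]
          rw [if_neg (by simpa using h)]
          simp only [Option.getD_none]
          rw [Eq.comm, List.filter_eq_self]
          intro a ha
          simpa using fun hab : a = b => h (hab ▸ ha)
      rw [List.foldl_cons, hstep, ih, List.filter_filter]
      apply List.filter_congr
      intro x _
      by_cases hxb : x = b <;> simp [hxb]

-- the whole inner removal loop turns depends[a] into its intersection with `has`
theorem pv_inner_filter (s has : PySem.Set String) :
    (s.filter (fun x => !(PySem.Set.contains has x))).foldl
        (fun t b => (PySem.Set.remove? t b).getD t) s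
      = s.filter (fun x => PySem.Set.contains has x) := by
  rw [pv_foldl_remove]
  apply List.filter_congr
  intro x hx
  by_cases h : x ∈ has
  · simp [PySem.Set.contains, List.contains_eq_mem, List.mem_filter, h]
  · simp [PySem.Set.contains, List.contains_eq_mem, List.mem_filter, h, hx]

-- lookup in a dict whose items are a map over nodup keys
theorem pv_getD_map (m : List String) (g : String → PySem.Set String) (a : String)
    (ha : a ∈ m) :
    (PySem.Dict.mk (m.map (fun k => (k, g k)))).getD a PySem.Set.empty = g a := by
  induction m with
  | nil => cases ha
  | cons k m ih =>
      rcases List.mem_cons.1 ha with h | h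
      · subst h; simp [PySem.Dict.getD, PySem.Dict.get?]
      · by_cases hk : k = a
        · subst hk; simp [PySem.Dict.getD, PySem.Dict.get?]
        · have := ih h
          simpa [PySem.Dict.getD, PySem.Dict.get?, List.find?, hk] using this

theorem pv_contains_map (m : List String) (g : String → PySem.Set String) (a : String) :
    (PySem.Dict.mk (m.map (fun k => (k, g k)))).contains a = m.contains a := by
  simp only [PySem.Dict.contains, List.any_map, Function.comp_def]
  induction m with
  | nil => rfl
  | cons b m ih =>
      simp only [List.any_cons, List.contains_cons, ih]
      rw [BEq.comm]

-- inserting at a key already present rewrites that key's value in place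
theorem pv_insert_mem (m : List String) (g : String → PySem.Set String) (a : String)
    (v : PySem.Set String) (ha : a ∈ m) :
    (PySem.Dict.mk (m.map (fun k => (k, g k)))).insert a v
      = PySem.Dict.mk (m.map (fun k => (k, if k == a then v else g k))) := by
  have hc : (PySem.Dict.mk (m.map (fun k => (k, g k)))).contains a = true := by
    rw [pv_contains_map]; simpa [List.contains_eq_mem] using ha
  simp only [PySem.Dict.insert, hc, if_pos]
  congr 1
  rw [List.map_map]
  apply List.map_congr_left
  intro k _
  by_cases hk : k = a
  · subst hk; simp
  · simp [hk]

-- inserting at a fresh key appends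
theorem pv_insert_not_mem (m : List String) (g : String → PySem.Set String) (a : String)
    (v : PySem.Set String) (ha : a ∉ m) :
    (PySem.Dict.mk (m.map (fun k => (k, g k)))).insert a v
      = PySem.Dict.mk (m.map (fun k => (k, g k)) ++ [(a, v)]) := by
  have hc : (PySem.Dict.mk (m.map (fun k => (k, g k)))).contains a = false := by
    rw [pv_contains_map]; simpa [List.contains_eq_mem] using ha
  simp [PySem.Dict.insert, hc]

-- a fold of inserts whose value is a function of the key alone
theorem pv_foldl_insert_fun (l : List String) (f : String → PySem.Set String)
    (m : List String) :
    (l.foldl (fun d x => d.insert x (f x)) (PySem.Dict.mk (m.map (fun k => (k, f k)))))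
      = PySem.Dict.mk ((PySem.Set.update m l).map (fun k => (k, f k))) := by
  induction l generalizing m with
  | nil => simp [PySem.Set.update]
  | cons x l ih =>
      rw [List.foldl_cons]
      by_cases hx : x ∈ m
      · rw [pv_insert_mem m f x (f x) hx]
        have : (fun k => (k, if k == x then f x else f k)) = fun k => (k, f k) := by
          funext k; by_cases hk : k = x
          · subst hk; simp
          · simp [hk]
        rw [this, ih]
        have : PySem.Set.add m x = m := by
          simp [PySem.Set.add, PySem.Set.contains, List.contains_eq_mem, hx]
        simp [PySem.Set.update, PySem.Set.add, PySem.Set.contains,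
          List.contains_eq_mem, hx]
      · rw [pv_insert_not_mem m f x (f x) hx]
        have hmx : m.map (fun k => (k, f k)) ++ [(x, f x)]
            = (m ++ [x]).map (fun k => (k, f k)) := by simp
        rw [hmx, ih]
        simp [PySem.Set.update, PySem.Set.add, PySem.Set.contains,
          List.contains_eq_mem, hx]

-- the inner removal loop, at the dict level, is one insert of the folded value
theorem pv_foldl_modify (bs : List String) (d : PySem.Dict String (PySem.Set String))
    (a : String) (hbs : bs ≠ []) :
    bs.foldl (fun d b =>
        d.modify a PySem.Set.empty (fun s => (PySem.Set.remove? s b).getD s)) d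
      = d.insert a (bs.foldl (fun t b => (PySem.Set.remove? t b).getD t)
          (d.getD a PySem.Set.empty)) := by
  induction bs generalizing d with
  | nil => cases hbs rfl
  | cons b bs ih =>
      rw [List.foldl_cons, List.foldl_cons]
      by_cases h : bs = []
      · subst h; simp [PySem.Dict.modify]
      · rw [ih _ h]
        simp [PySem.Dict.modify, PySem.Dict.getD_insert_self,
          PySem.Dict.insert_insert_self]

-- one key's step of A's middle loop on the map representation
theorem pv_midstep (m : List String) (g : String → PySem.Set String)
    (has : PySem.Set String) (a : String) (ha : a ∈ m) :
    (((PySem.Dict.mk (m.map (fun k => (k, g k)))).getD a PySem.Set.empty).filter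
        (fun x => !(PySem.Set.contains has x))).foldl
      (fun d b => d.modify a PySem.Set.empty (fun s => (PySem.Set.remove? s b).getD s))
      (PySem.Dict.mk (m.map (fun k => (k, g k))))
      = PySem.Dict.mk (m.map (fun k =>
          (k, if k == a then (g k).filter (fun x => PySem.Set.contains has x) else g k))) := by
  rw [pv_getD_map m g a ha]
  by_cases hbs : (g a).filter (fun x => !(PySem.Set.contains has x)) = []
  · rw [hbs]
    simp only [List.foldl_nil]
    congr 1
    apply List.map_congr_left
    intro k _
    by_cases hk : k = a
    · subst hk
      simp only [beq_self_eq_true, if_pos]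
      rw [List.filter_eq_self.2]
      intro x hx
      by_contra hcon
      have hmem : x ∈ List.filter (fun x => !(PySem.Set.contains has x)) (g k) :=
        List.mem_filter.2 ⟨hx, by simpa using hcon⟩
      rw [hbs] at hmem
      cases hmem
    · simp [hk]
  · rw [pv_foldl_modify _ _ _ hbs, pv_getD_map m g a ha, pv_inner_filter,
      pv_insert_mem m g a _ ha]
    congr 1
    apply List.map_congr_left
    intro k _
    by_cases hk : k = a
    · subst hk; simp
    · simp [hk]

-- A's middle loop over the elements of `has`
theorem pv_midloop (as : List String) (m : List String) (g : String → PySem.Set String)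
    (has : PySem.Set String) (hnd : as.Nodup) (hsub : ∀ a ∈ as, a ∈ m) :
    as.foldl (fun d a =>
        ((d.getD a PySem.Set.empty).filter (fun x => !(PySem.Set.contains has x))).foldl
          (fun d b => d.modify a PySem.Set.empty (fun s => (PySem.Set.remove? s b).getD s)) d)
      (PySem.Dict.mk (m.map (fun k => (k, g k))))
      = PySem.Dict.mk (m.map (fun k =>
          (k, if as.contains k then (g k).filter (fun x => PySem.Set.contains has x)
              else g k))) := by
  induction as generalizing g with
  | nil => simp
  | cons a as ih =>
      rw [List.foldl_cons, pv_midstep m g has a (hsub a (by simp))]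
      rw [ih (fun k => if k == a then (g k).filter (fun x => PySem.Set.contains has x) else g k)
        (List.nodup_cons.1 hnd).2 (fun b hb => hsub b (by simp [hb]))]
      congr 1
      apply List.map_congr_left
      intro k _
      by_cases hk : k = a
      · subst hk
        have hka : k ∉ as := (List.nodup_cons.1 hnd).1
        simp [List.contains_eq_mem, hka]
      · by_cases hkas : k ∈ as <;> simp [hk, List.contains_eq_mem, hkas]

-- per-key semantics of A's outer loop
theorem pv_outer (keys : List String) (vs : List (String × List String))
    (m : List String) (g : String → PySem.Set String)
    (hm : m = PySem.Set.ofList keys) :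
    vs.foldl (fun d v =>
        (pvHas keys v).foldl (fun d a =>
          ((d.getD a PySem.Set.empty).filter
              (fun x => !(PySem.Set.contains (pvHas keys v) x))).foldl
            (fun d b => d.modify a PySem.Set.empty
              (fun s => (PySem.Set.remove? s b).getD s)) d) d)
      (PySem.Dict.mk (m.map (fun k => (k, g k))))
      = PySem.Dict.mk (m.map (fun k =>
          (k, vs.foldl (fun s v =>
            if List.contains (pvHas keys v) k
            then s.filter (fun x => PySem.Set.contains (pvHas keys v) x) else s) (g k)))) := by
  induction vs generalizing g with
  | nil => simp
  | cons v vs ih =>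
      rw [List.foldl_cons]
      have hnd : (pvHas keys v).Nodup := PySem.Set.nodup_ofList _
      have hsub : ∀ a ∈ pvHas keys v, a ∈ m := by
        intro a ha
        have hmem : a ∈ v.2.filter (fun x => keys.contains x) :=
          (PySem.Set.mem_ofList _ _).1 ha
        have hk : a ∈ keys := by
          have := List.mem_filter.1 hmem
          simpa [List.contains_eq_mem] using this.2
        rw [hm]; exact (PySem.Set.mem_ofList _ _).2 hk
      rw [pv_midloop (pvHas keys v) m g (pvHas keys v) hnd hsub]
      rw [ih (fun k => if List.contains (pvHas keys v) k
            then (g k).filter (fun x => PySem.Set.contains (pvHas keys v) x) else g k)]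
      rfl

-- the per-key fold of filters is one filter by the conjunction
theorem pv_G_filter (keys : List String) (vs : List (String × List String))
    (s0 : PySem.Set String) (k : String) :
    vs.foldl (fun s v =>
        if List.contains (pvHas keys v) k
        then s.filter (fun x => PySem.Set.contains (pvHas keys v) x) else s) s0
      = s0.filter (fun x => (vs.map (pvHas keys)).all
          (fun h => !(PySem.Set.contains h k) || PySem.Set.contains h x)) := by
  simp only [PySem.Set.contains]
  induction vs generalizing s0 with
  | nil => simp
  | cons v vs ih =>
      rw [List.foldl_cons]
      by_cases h : List.contains (pvHas keys v) k = true
      · have hm : k ∈ pvHas keys v := by simpa [List.contains_eq_mem] using h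
        rw [if_pos h, ih, List.filter_filter]
        apply List.filter_congr
        intro x _
        simp [hm, Bool.and_comm]
      · have hm : k ∉ pvHas keys v := by simpa [List.contains_eq_mem] using h
        rw [if_neg h, ih]
        apply List.filter_congr
        intro x _
        simp [hm]

-- a fold of inserts never touches a key outside the folded list
theorem pv_getD_foldl_insert_ne (l : List String)
    (f : PySem.Dict String (List (PySem.Set String)) → String → List (PySem.Set String))
    (d : PySem.Dict String (List (PySem.Set String))) (a : String) (ha : a ∉ l) :
    (l.foldl (fun d b => d.insert b (f d b)) d).getD a [] = d.getD a [] := by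
  induction l generalizing d with
  | nil => rfl
  | cons b l ih =>
      rw [List.foldl_cons, ih _ (fun h => ha (List.mem_cons.2 (Or.inr h)))]
      simp [PySem.Dict.getD, PySem.Dict.get?_insert_of_ne _ _
        (fun h => ha (List.mem_cons.2 (Or.inl h)))]

-- one row's indexing pass appends the row's has-set to exactly the keys it contains
theorem pv_owner_inner (l : List String) (h : PySem.Set String)
    (d : PySem.Dict String (List (PySem.Set String))) (a : String) (hnd : l.Nodup) :
    (l.foldl (fun d b => d.insert b (d.getD b [] ++ [h])) d).getD a []
      = d.getD a [] ++ (if List.contains l a then [h] else []) := by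
  induction l generalizing d with
  | nil => simp
  | cons b l ih =>
      rw [List.foldl_cons]
      by_cases hab : a = b
      · subst hab
        have hnotin : a ∉ l := (List.nodup_cons.1 hnd).1
        rw [pv_getD_foldl_insert_ne l _ _ a hnotin, PySem.Dict.getD_insert_self]
        simp
      · rw [ih _ (List.nodup_cons.1 hnd).2]
        have : (d.insert b (d.getD b [] ++ [h])).getD a [] = d.getD a [] := by
          simp [PySem.Dict.getD, PySem.Dict.get?_insert_of_ne _ _ hab]
        rw [this]
        simp [hab]

-- the whole indexing pass: each key's owner list is the has-sets containing it, in order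
theorem pv_owner_list (vs : List (String × List String)) (keyset : PySem.Set String)
    (hnd : keyset.Nodup) (d : PySem.Dict String (List (PySem.Set String))) (a : String) :
    (vs.foldl (fun d v =>
        (PySem.Set.inter keyset v.2).foldl
          (fun d a => d.insert a (d.getD a [] ++ [PySem.Set.inter keyset v.2])) d) d).getD a []
      = d.getD a [] ++ (vs.map (fun v => PySem.Set.inter keyset v.2)).filter
          (fun h => List.contains h a) := by
  induction vs generalizing d with
  | nil => simp
  | cons v vs ih =>
      have hint : (PySem.Set.inter keyset v.2).Nodup := by
        simpa [PySem.Set.inter] using hnd.filter (fun x => List.contains v.2 x)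
      rw [List.foldl_cons, ih, pv_owner_inner (PySem.Set.inter keyset v.2) _ _ _ hint,
        List.map_cons, List.filter_cons]
      by_cases hc : List.contains (PySem.Set.inter keyset v.2) a = true
      · rw [if_pos hc, if_pos (by simpa [PySem.Set.contains] using hc)]
        simp
      · rw [if_neg hc, if_neg (by simpa [PySem.Set.contains] using hc)]
        simp

-- folding set-intersections is one filter by the conjunction of memberships
theorem pv_foldl_inter (hs : List (PySem.Set String)) (s0 : PySem.Set String) :
    hs.foldl PySem.Set.inter s0
      = s0.filter (fun x => hs.all (fun h => List.contains h x)) := by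
  induction hs generalizing s0 with
  | nil => simp
  | cons h hs ih =>
      rw [List.foldl_cons, ih]
      simp only [PySem.Set.inter, PySem.Set.contains, List.filter_filter, List.all_cons]
      apply List.filter_congr
      intro x _
      cases hx : List.contains h x <;> simp

-- the two notions of a row's has-set agree element-wise
theorem pv_contains_has (keys : List String) (v : String × List String) (y : String) :
    List.contains (PySem.Set.inter (PySem.Set.ofList keys) v.2) y
      = List.contains (pvHas keys v) y := by
  rw [Bool.eq_iff_iff]
  simp [pvHas, PySem.Set.inter, PySem.Set.contains, List.contains_eq_mem,
    List.mem_filter, PySem.Set.mem_ofList, and_comm]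

-- ===== VERDICT (by name: the statement is the Claim_ definition above) =====
theorem get_atomic_depends_spec : Claim_equal_get_atomic_depends := by
  intro vals keys _
  unfold Spec_get_atomic_depends get_atomic_depends get_atomic_depends_alt
  simp only []
  -- initial dict of A: every key maps to the full key-set
  have hinit :
      keys.foldl (fun d x => d.insert x (PySem.Set.ofList keys)) (PySem.Dict.mk [])
        = PySem.Dict.mk ((PySem.Set.ofList keys).map
            (fun k => (k, PySem.Set.ofList keys))) := by
    have := pv_foldl_insert_fun keys (fun _ => PySem.Set.ofList keys) []
    simpa [PySem.Set.update, PySem.Set.ofList] using this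
  -- B's result dict, value as a function of the key
  have halt :
      keys.foldl (fun d a =>
          d.insert a (((vals.foldl (fun d v =>
              (PySem.Set.inter (PySem.Set.ofList keys) v.2).foldl
                (fun d a => d.insert a (d.getD a [] ++ [PySem.Set.inter (PySem.Set.ofList keys) v.2])) d)
            (PySem.Dict.mk [])).getD a []).foldl PySem.Set.inter (PySem.Set.ofList keys)))
        (PySem.Dict.mk [])
        = PySem.Dict.mk ((PySem.Set.ofList keys).map (fun a =>
            (a, ((vals.foldl (fun d v =>
              (PySem.Set.inter (PySem.Set.ofList keys) v.2).foldl
                (fun d a => d.insert a (d.getD a [] ++ [PySem.Set.inter (PySem.Set.ofList keys) v.2])) d)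
            (PySem.Dict.mk [])).getD a []).foldl PySem.Set.inter (PySem.Set.ofList keys)))) := by
    have := pv_foldl_insert_fun keys
      (fun a => ((vals.foldl (fun d v =>
              (PySem.Set.inter (PySem.Set.ofList keys) v.2).foldl
                (fun d a => d.insert a (d.getD a [] ++ [PySem.Set.inter (PySem.Set.ofList keys) v.2])) d)
            (PySem.Dict.mk [])).getD a []).foldl PySem.Set.inter (PySem.Set.ofList keys)) []
    simpa [PySem.Set.update, PySem.Set.ofList] using this
  rw [hinit, halt]
  have houter := pv_outer keys vals (PySem.Set.ofList keys)
    (fun _ => PySem.Set.ofList keys) rfl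
  simp only [pvHas] at houter
  rw [houter]
  apply congrArg PySem.Dict.items
  apply congrArg PySem.Dict.mk
  apply List.map_congr_left
  intro k hk
  congr 1
  -- A's value at k
  have hGk := pv_G_filter keys vals (PySem.Set.ofList keys) k
  simp only [pvHas] at hGk
  rw [hGk]
  -- B's value at k
  rw [pv_owner_list vals (PySem.Set.ofList keys) (PySem.Set.nodup_ofList keys)
    (PySem.Dict.mk []) k]
  have hempty : (PySem.Dict.mk ([] : List (String × List (PySem.Set String)))).getD k [] = [] := rfl
  rw [hempty, List.nil_append, pv_foldl_inter]
  apply List.filter_congr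
  intro x _
  rw [List.all_filter, List.all_map, List.all_map]
  congr 1
  funext v
  simp only [Function.comp_def, PySem.Set.contains, pv_contains_has]
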